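-- pv_equiv track=rewrite | github.com/LafreniereJ/Resource-Capital | src/scrapers/selenium_scrapers.py | categorize_document
-- ===== SOURCE A (Python) =====
-- def categorize_document(title):
--     """Categorize document based on title"""
--
--     title_lower = title.lower()
--
--     if any(word in title_lower for word in ['quarterly', 'q1', 'q2', 'q3', 'q4']):
--         return 'quarterly_results'
--     elif any(word in title_lower for word in ['annual', 'year']):
--         return 'annual_results'
--     elif any(word in title_lower for word in ['presentation', 'investor']):
--         return 'investor_presentation'
--     elif any(word in title_lower for word in ['technical', 'feasibility', 'pea', 'pfs']):
--         return 'technical_report'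
--     else:
--         return 'other'
-- ===== SOURCE B (Python) =====
-- KEYWORD_PRIORITY = [
--     ("quarterly", 0), ("q1", 0), ("q2", 0), ("q3", 0), ("q4", 0),
--     ("annual", 1), ("year", 1),
--     ("presentation", 2), ("investor", 2),
--     ("technical", 3), ("feasibility", 3), ("pea", 3), ("pfs", 3),
-- ]
-- CATEGORIES = ["quarterly_results", "annual_results",
--               "investor_presentation", "technical_report", "other"]
--
-- def categorize_document(title):
--     """Categorize document based on title.
--
--     Single accumulator pass over a flat keyword->priority list: compute the
--     minimum priority among all keywords occurring in the lowercased title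
--     (4 = no match), then index into the category table.
--     """
--     t = title.lower()
--     best = 4
--     for kw, p in KEYWORD_PRIORITY:
--         if kw in t:
--             best = min(best, p)
--     return CATEGORIES[best]
-- ===== Notes on version B (the rewrite author's own statement) =====
-- stated objective: alternative
-- what changed: Replaces the if/elif chain of grouped any() tests (early return on the first matching group) with one exhaustive accumulator pass over a flat keyword->priority list that computes the minimum matching priority and indexes a category table.
import Mathlib
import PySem

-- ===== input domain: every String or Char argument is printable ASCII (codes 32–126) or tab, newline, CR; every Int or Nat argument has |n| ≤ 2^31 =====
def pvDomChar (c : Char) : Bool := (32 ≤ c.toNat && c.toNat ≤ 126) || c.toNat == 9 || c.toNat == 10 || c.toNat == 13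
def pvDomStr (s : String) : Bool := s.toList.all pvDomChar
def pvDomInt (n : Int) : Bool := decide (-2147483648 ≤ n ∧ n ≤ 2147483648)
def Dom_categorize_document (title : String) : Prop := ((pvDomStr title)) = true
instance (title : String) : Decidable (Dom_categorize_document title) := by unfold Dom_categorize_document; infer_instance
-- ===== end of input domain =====

-- ===== PORT A =====
def categorize_document (title : String) : String :=
  let title_lower := PySem.Str.lower title
  if ["quarterly", "q1", "q2", "q3", "q4"].any (fun word => PySem.Str.isIn word title_lower) then
    "quarterly_results"
  else if ["annual", "year"].any (fun word => PySem.Str.isIn word title_lower) then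
    "annual_results"
  else if ["presentation", "investor"].any (fun word => PySem.Str.isIn word title_lower) then
    "investor_presentation"
  else if ["technical", "feasibility", "pea", "pfs"].any (fun word => PySem.Str.isIn word title_lower) then
    "technical_report"
  else
    "other"

-- B: one exhaustive accumulator pass over a flat keyword->priority list (min matching
-- priority, 4 = no match), then an index into the category table; equal return value proved below.
-- ===== PORT B =====
def pvKw : List (String × Nat) :=
  [("quarterly", 0), ("q1", 0), ("q2", 0), ("q3", 0), ("q4", 0),
   ("annual", 1), ("year", 1),
   ("presentation", 2), ("investor", 2),
   ("technical", 3), ("feasibility", 3), ("pea", 3), ("pfs", 3)]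

def pvCats : List String :=
  ["quarterly_results", "annual_results", "investor_presentation", "technical_report", "other"]

def categorize_document_alt (title : String) : String :=
  let t := PySem.Str.lower title
  let best := pvKw.foldl (fun b q => if PySem.Str.isIn q.1 t then min b q.2 else b) 4
  pvCats.getD best "other"

-- ===== PRECONDITION & SPEC =====
def Spec_categorize_document (title : String) (out : String) : Prop := out = categorize_document_alt title
instance (title : String) (out : String) : Decidable (Spec_categorize_document title out) := by unfold Spec_categorize_document; infer_instance

-- ===== CLAIM (what is proved, stated in full; the proofs are below) =====
def Claim_equal_categorize_document : Prop := ∀ (title : String), Dom_categorize_document title → Spec_categorize_document title (categorize_document title)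

-- ===== LEMMAS AND PROOFS =====

-- Folding one constant-priority keyword group updates the accumulator to `min b p`
-- exactly when some keyword of the group occurs in `t`.
theorem pv_foldl_group (t : String) (p : Nat) (kws : List String) (b : Nat) :
    (kws.map (fun k => (k, p))).foldl
      (fun b q => if PySem.Str.isIn q.1 t then min b q.2 else b) b
    = if kws.any (fun k => PySem.Str.isIn k t) then min b p else b := by
  induction kws generalizing b with
  | nil => simp
  | cons k ks ih =>
    simp only [List.map, List.foldl, List.any]
    rw [ih]
    rcases Bool.eq_false_or_eq_true (PySem.Str.isIn k t) with h | h <;>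
      rcases Bool.eq_false_or_eq_true (ks.any fun k => PySem.Str.isIn k t) with h2 | h2 <;>
      simp only [h, h2] <;> simp

theorem pvKw_split :
    pvKw = (["quarterly", "q1", "q2", "q3", "q4"].map (fun k => (k, (0 : Nat))))
        ++ (["annual", "year"].map (fun k => (k, (1 : Nat))))
        ++ (["presentation", "investor"].map (fun k => (k, (2 : Nat))))
        ++ (["technical", "feasibility", "pea", "pfs"].map (fun k => (k, (3 : Nat)))) := rfl

-- ===== VERDICT (by name: the statement is the Claim_ definition above) =====
theorem categorize_document_spec : Claim_equal_categorize_document := by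
  intro title _
  unfold Spec_categorize_document categorize_document categorize_document_alt
  rw [pvKw_split]
  simp only [List.foldl_append, pv_foldl_group]
  generalize (["quarterly", "q1", "q2", "q3", "q4"].any
      (fun k => PySem.Str.isIn k (PySem.Str.lower title))) = c0
  generalize (["annual", "year"].any
      (fun k => PySem.Str.isIn k (PySem.Str.lower title))) = c1
  generalize (["presentation", "investor"].any
      (fun k => PySem.Str.isIn k (PySem.Str.lower title))) = c2
  generalize (["technical", "feasibility", "pea", "pfs"].any
      (fun k => PySem.Str.isIn k (PySem.Str.lower title))) = c3
  cases c0 <;> cases c1 <;> cases c2 <;> cases c3 <;> decide
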